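-- pv_equiv track=rewrite | github.com/saj9191/ripple | simulation_graph.py | calculate_stage_counts
-- ===== SOURCE A (Python) =====
-- def calculate_stage_counts(points):
--   stage_to_timestamps = {}
--   stage_to_counts = {}
--   for [time, increment, stage] in points:
--     if stage not in stage_to_counts:
--       stage_to_counts[stage] = [0]
--       stage_to_timestamps[stage] = [0]
--
--     count = stage_to_counts[stage][-1]
--     count += increment
--     stage_to_counts[stage].append(count)
--     stage_to_timestamps[stage].append(time)
--   return [stage_to_timestamps, stage_to_counts]
-- ===== SOURCE B (Python) =====
-- def _prefix_sums(entries):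
--   # running totals of the increments, seeded with 0
--   total = 0
--   sums = [0]
--   for _, inc in entries:
--     total += inc
--     sums.append(total)
--   return sums
--
--
-- def calculate_stage_counts(points):
--   # group first: stage -> [(time, increment), ...] in encounter order
--   groups = {}
--   for time, increment, stage in points:
--     groups.setdefault(stage, []).append((time, increment))
--   stage_to_timestamps = {
--       stage: [0] + [time for time, _ in entries]
--       for stage, entries in groups.items()
--   }
--   stage_to_counts = {
--       stage: _prefix_sums(entries)
--       for stage, entries in groups.items()
--   }
--   return [stage_to_timestamps, stage_to_counts]
-- ===== Notes on version B (the rewrite author's own statement) =====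
-- stated objective: alternative
-- what changed: A interleaves per-stage incremental updates of both result dicts inside one loop; B first buckets points into an ordered stage->(time,increment) grouping dict, then derives each stage's timestamp list and 0-seeded prefix-sum count list in a separate phase.
import Mathlib
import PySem

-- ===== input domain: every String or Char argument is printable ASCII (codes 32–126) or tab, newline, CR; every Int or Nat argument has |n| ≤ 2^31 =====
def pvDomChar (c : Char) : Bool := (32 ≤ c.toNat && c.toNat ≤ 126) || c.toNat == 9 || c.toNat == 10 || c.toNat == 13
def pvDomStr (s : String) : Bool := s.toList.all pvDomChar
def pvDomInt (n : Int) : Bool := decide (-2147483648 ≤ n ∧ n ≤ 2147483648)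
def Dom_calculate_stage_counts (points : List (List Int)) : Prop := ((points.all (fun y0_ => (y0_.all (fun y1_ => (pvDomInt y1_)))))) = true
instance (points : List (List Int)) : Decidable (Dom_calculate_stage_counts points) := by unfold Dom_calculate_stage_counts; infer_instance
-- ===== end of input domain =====

-- B groups the points by stage first and derives both result dicts in a second phase
-- (same return value as A; neither is measurably faster).

-- ===== PORT A =====
-- one loop iteration of A: unpack [time, increment, stage], seed both dicts on a fresh
-- stage, then append the running count and the timestamp
def aStep (st : PySem.Dict Int (List Int) × PySem.Dict Int (List Int)) (p : List Int) :
    PySem.Dict Int (List Int) × PySem.Dict Int (List Int) :=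
  match p with
  | [time, increment, stage] =>
    let st2 := if st.2.contains stage then st
               else (st.1.insert stage [0], st.2.insert stage [0])
    -- count = stage_to_counts[stage][-1] (list is nonempty here, so the total form is exact)
    let count := PySem.List.pyGetD (st2.2.getD stage []) (-1) 0 + increment
    (st2.1.modify stage [] (fun l => l ++ [time]),
     st2.2.modify stage [] (fun l => l ++ [count]))
  | _ => st   -- Python raises ValueError (unpacking) here; excluded by Pre_

def calculate_stage_counts (points : List (List Int)) : List (List (Int × List Int)) :=
  let st := points.foldl aStep (PySem.Dict.empty, PySem.Dict.empty)
  [st.1.items, st.2.items]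

-- ===== PORT B =====
-- running totals of the increments, seeded with 0
def prefixSums (entries : List (Int × Int)) : List Int :=
  (entries.foldl (fun st e => (st.1 + e.2, st.2 ++ [st.1 + e.2])) ((0 : Int), [(0 : Int)])).2

-- groups.setdefault(stage, []).append((time, increment)) — Dict.modify is exactly
-- d[k] = f(d.get(k, dflt)), i.e. setdefault-then-append in one step
def bGroup (g : PySem.Dict Int (List (Int × Int))) (p : List Int) :
    PySem.Dict Int (List (Int × Int)) :=
  match p with
  | [time, increment, stage] => g.modify stage [] (fun l => l ++ [(time, increment)])
  | _ => g   -- Python raises ValueError (unpacking) here; excluded by Pre_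

def calculate_stage_counts_alt (points : List (List Int)) : List (List (Int × List Int)) :=
  let g := points.foldl bGroup PySem.Dict.empty
  let tsD := g.items.foldl
    (fun d kv => d.insert kv.1 ((0 : Int) :: kv.2.map Prod.fst)) PySem.Dict.empty
  let ctD := g.items.foldl
    (fun d kv => d.insert kv.1 (prefixSums kv.2)) PySem.Dict.empty
  [tsD.items, ctD.items]

-- ===== PRECONDITION & SPEC =====
-- Pre_ excludes points that are not 3-element lists: Python's unpacking
-- 'for [time, increment, stage] in points' raises ValueError there (in A and in B alike).
def Pre_calculate_stage_counts (points : List (List Int)) : Prop :=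
  ∀ p ∈ points, p.length = 3
instance (points : List (List Int)) : Decidable (Pre_calculate_stage_counts points) := by
  unfold Pre_calculate_stage_counts; infer_instance
def pvWitness_calculate_stage_counts : List (List Int) :=
  [[1, 2, 0], [3, 1, 0], [4, -1, 7]]
def Spec_calculate_stage_counts (points : List (List Int)) (out : List (List (Int × List Int))) : Prop := out = calculate_stage_counts_alt points
instance (points : List (List Int)) (out : List (List (Int × List Int))) : Decidable (Spec_calculate_stage_counts points out) := by unfold Spec_calculate_stage_counts; infer_instance

-- ===== CLAIM (what is proved, stated in full; the proofs are below) =====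
def Claim_equal_calculate_stage_counts : Prop := ∀ (points : List (List Int)), Dom_calculate_stage_counts points → Pre_calculate_stage_counts points → Spec_calculate_stage_counts points (calculate_stage_counts points)

-- ===== LEMMAS AND PROOFS =====

-- the two result dicts, read off a grouping dict
def Tmap (g : PySem.Dict Int (List (Int × Int))) : PySem.Dict Int (List Int) :=
  PySem.Dict.mk (g.items.map (fun kv => (kv.1, (0 : Int) :: kv.2.map Prod.fst)))
def Cmap (g : PySem.Dict Int (List (Int × Int))) : PySem.Dict Int (List Int) :=
  PySem.Dict.mk (g.items.map (fun kv => (kv.1, prefixSums kv.2)))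

theorem keys_Tmap (g : PySem.Dict Int (List (Int × Int))) : (Tmap g).keys = g.keys := by
  simp [Tmap, PySem.Dict.keys, List.map_map, Function.comp]

theorem keys_Cmap (g : PySem.Dict Int (List (Int × Int))) : (Cmap g).keys = g.keys := by
  simp [Cmap, PySem.Dict.keys, List.map_map, Function.comp]

theorem contains_Tmap (g : PySem.Dict Int (List (Int × Int))) (s : Int) :
    (Tmap g).contains s = g.contains s := by
  simp [Tmap, PySem.Dict.contains, List.any_map, Function.comp_def]

theorem contains_Cmap (g : PySem.Dict Int (List (Int × Int))) (s : Int) :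
    (Cmap g).contains s = g.contains s := by
  simp [Cmap, PySem.Dict.contains, List.any_map, Function.comp_def]

-- the last running total equals the accumulator's first component
theorem last_prefixAux (es : List (Int × Int)) :
    ∀ (tot : Int) (acc : List Int),
      PySem.List.pyGetD ((es.foldl (fun st e => (st.1 + e.2, st.2 ++ [st.1 + e.2]))
        (tot, acc ++ [tot])).2) (-1) 0
      = (es.foldl (fun st e => (st.1 + e.2, st.2 ++ [st.1 + e.2])) (tot, acc ++ [tot])).1 := by
  induction es with
  | nil => intro tot acc; exact PySem.List.pyGetD_neg_one_append_singleton acc tot 0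
  | cons e es ih =>
    intro tot acc
    simpa [List.append_assoc] using ih (tot + e.2) (acc ++ [tot])

theorem last_prefixSums (es : List (Int × Int)) :
    PySem.List.pyGetD (prefixSums es) (-1) 0
      = (es.foldl (fun st e => (st.1 + e.2, st.2 ++ [st.1 + e.2])) ((0 : Int), [(0 : Int)])).1 := by
  simpa using last_prefixAux es 0 []

theorem prefixSums_append (es : List (Int × Int)) (e : Int × Int) :
    prefixSums (es ++ [e]) = prefixSums es ++ [PySem.List.pyGetD (prefixSums es) (-1) 0 + e.2] := by
  rw [last_prefixSums]
  simp [prefixSums, List.foldl_append]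

-- bGroup keeps the grouping dict's keys unique
theorem nodup_bfold (points : List (List Int)) :
    ∀ (g : PySem.Dict Int (List (Int × Int))), g.keys.Nodup →
      (points.foldl bGroup g).keys.Nodup := by
  induction points with
  | nil => intro g hg; exact hg
  | cons p ps ih =>
    intro g hg
    apply ih
    match p with
    | [] => exact hg
    | [_] => exact hg
    | [_, _] => exact hg
    | [t, i, s] => simpa [bGroup, PySem.Dict.modify] using PySem.Dict.nodup_keys_insert _ _ _ hg
    | _ :: _ :: _ :: _ :: _ => exact hg

-- one step of A, read through Tmap/Cmap, is one step of B's grouping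
theorem step_eq (g : PySem.Dict Int (List (Int × Int))) (t i s : Int)
    (hg : g.keys.Nodup) :
    aStep (Tmap g, Cmap g) [t, i, s] = (Tmap (bGroup g [t, i, s]), Cmap (bGroup g [t, i, s])) := by
  simp only [aStep, bGroup, PySem.Dict.modify, contains_Cmap]
  by_cases hc : g.contains s = true
  · -- the stage is already present
    obtain ⟨p, hmem, hps⟩ := List.any_eq_true.mp hc
    obtain ⟨es, rfl⟩ : ∃ es, p = (s, es) := ⟨p.2, by rw [← (beq_iff_eq).mp hps]⟩
    have hgD : g.getD s [] = es := PySem.Dict.getD_of_mem_items g hmem hg []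
    have hCD : (Cmap g).getD s [] = prefixSums es := by
      refine PySem.Dict.getD_of_mem_items (Cmap g) ?_ ?_ []
      · exact List.mem_map_of_mem hmem
      · rw [keys_Cmap]; exact hg
    have hTD : (Tmap g).getD s [] = (0 : Int) :: es.map Prod.fst := by
      refine PySem.Dict.getD_of_mem_items (Tmap g) ?_ ?_ []
      · exact List.mem_map_of_mem hmem
      · rw [keys_Tmap]; exact hg
    rw [if_pos hc, hgD, hCD, hTD]
    have hTc : (Tmap g).contains s = true := by rw [contains_Tmap]; exact hc
    have hCc : (Cmap g).contains s = true := by rw [contains_Cmap]; exact hc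
    rw [Prod.mk.injEq]
    refine ⟨?_, ?_⟩ <;> apply PySem.Dict.ext
    · show ((Tmap g).insert s ((0 : Int) :: List.map Prod.fst es ++ [t])).items
        = List.map (fun kv => (kv.1, (0 : Int) :: List.map Prod.fst kv.2))
            (g.insert s (es ++ [(t, i)])).items
      rw [PySem.Dict.items_insert_of_contains _ _ hTc,
        PySem.Dict.items_insert_of_contains _ _ hc]
      simp only [Tmap, List.map_map]
      refine List.map_congr_left (fun q hq => ?_)
      by_cases hqs : q.1 = s
      · simp [Function.comp, hqs]
      · simp [Function.comp, hqs]
    · show ((Cmap g).insert s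
          (prefixSums es ++ [PySem.List.pyGetD (prefixSums es) (-1) 0 + i])).items
        = List.map (fun kv => (kv.1, prefixSums kv.2)) (g.insert s (es ++ [(t, i)])).items
      rw [PySem.Dict.items_insert_of_contains _ _ hCc,
        PySem.Dict.items_insert_of_contains _ _ hc]
      simp only [Cmap, List.map_map]
      refine List.map_congr_left (fun q hq => ?_)
      by_cases hqs : q.1 = s
      · simp only [Function.comp, hqs]
        simp [prefixSums_append es (t, i)]
      · simp [Function.comp, hqs]
  · -- fresh stage: both sides append a new entry
    have hc' : g.contains s = false := by simpa using hc
    have hTc : (Tmap g).contains s = false := by rw [contains_Tmap]; exact hc'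
    have hgD : g.getD s [] = [] := PySem.Dict.getD_of_not_contains g [] hc'
    rw [if_neg hc, hgD,
      PySem.Dict.getD_insert_self, PySem.Dict.getD_insert_self,
      PySem.Dict.insert_insert_self, PySem.Dict.insert_insert_self]
    rw [Prod.mk.injEq]
    refine ⟨?_, ?_⟩ <;> apply PySem.Dict.ext
    · show _ = (Tmap (g.insert s ([] ++ [(t, i)]))).items
      rw [PySem.Dict.items_insert_of_not_contains _ _ hTc]
      simp [Tmap, PySem.Dict.items_insert_of_not_contains _ _ hc']
    · show _ = (Cmap (g.insert s ([] ++ [(t, i)]))).items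
      rw [PySem.Dict.items_insert_of_not_contains _ _
        (show (Cmap g).contains s = false by rw [contains_Cmap]; exact hc')]
      simp [Cmap, PySem.Dict.items_insert_of_not_contains _ _ hc', prefixSums,
        PySem.List.pyGetD, PySem.List.pyGet?, PySem.List.pyIdx?]

theorem inv (points : List (List Int)) :
    ∀ (g : PySem.Dict Int (List (Int × Int))),
      (∀ p ∈ points, p.length = 3) → g.keys.Nodup →
      points.foldl aStep (Tmap g, Cmap g)
        = (Tmap (points.foldl bGroup g), Cmap (points.foldl bGroup g)) := by
  induction points with
  | nil => intro g _ _; rfl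
  | cons p ps ih =>
    intro g hlen hg
    have hp : p.length = 3 := hlen p (List.mem_cons_self ..)
    match p, hp with
    | [t, i, s], _ =>
      have h1 : aStep (Tmap g, Cmap g) [t, i, s]
          = (Tmap (bGroup g [t, i, s]), Cmap (bGroup g [t, i, s])) := step_eq g t i s hg
      have h2 : (bGroup g [t, i, s]).keys.Nodup := by
        simpa [bGroup, PySem.Dict.modify] using PySem.Dict.nodup_keys_insert _ _ _ hg
      calc ([t, i, s] :: ps).foldl aStep (Tmap g, Cmap g)
          = ps.foldl aStep (aStep (Tmap g, Cmap g) [t, i, s]) := rfl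
        _ = _ := by rw [h1]; exact ih _ (fun q hq => hlen q (List.mem_cons_of_mem _ hq)) h2

-- B's second phase over fresh distinct keys is exactly Tmap / Cmap
theorem phase2_T (g : PySem.Dict Int (List (Int × Int))) (hg : g.keys.Nodup) :
    g.items.foldl (fun d kv => d.insert kv.1 ((0 : Int) :: kv.2.map Prod.fst)) PySem.Dict.empty
      = Tmap g := by
  apply PySem.Dict.ext
  rw [PySem.Dict.items_foldl_insert_fresh g.items Prod.fst
    (fun kv => (0 : Int) :: kv.2.map Prod.fst) PySem.Dict.empty
    (fun a _ => PySem.Dict.contains_empty a.1) hg]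
  rfl

theorem phase2_C (g : PySem.Dict Int (List (Int × Int))) (hg : g.keys.Nodup) :
    g.items.foldl (fun d kv => d.insert kv.1 (prefixSums kv.2)) PySem.Dict.empty
      = Cmap g := by
  apply PySem.Dict.ext
  rw [PySem.Dict.items_foldl_insert_fresh g.items Prod.fst
    (fun kv => prefixSums kv.2) PySem.Dict.empty
    (fun a _ => PySem.Dict.contains_empty a.1) hg]
  rfl

-- ===== VERDICT (by name: the statement is the Claim_ definition above) =====
theorem calculate_stage_counts_spec : Claim_equal_calculate_stage_counts := by
  intro points _ hpre
  unfold Spec_calculate_stage_counts calculate_stage_counts calculate_stage_counts_alt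
  have hge : (PySem.Dict.empty : PySem.Dict Int (List (Int × Int))).keys.Nodup := by
    simp [PySem.Dict.empty, PySem.Dict.keys]
  have h0 : (Tmap PySem.Dict.empty, Cmap PySem.Dict.empty)
      = ((PySem.Dict.empty : PySem.Dict Int (List Int)), (PySem.Dict.empty : PySem.Dict Int (List Int))) := by
    simp [Tmap, Cmap, PySem.Dict.empty]
  have hnd := nodup_bfold points PySem.Dict.empty hge
  have h := inv points PySem.Dict.empty hpre hge
  rw [h0] at h
  simp only [h, phase2_T _ hnd, phase2_C _ hnd]
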